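-- pv_equiv track=rewrite | github.com/rytoj/python-scripts | 370/370_notify.py | dubliu_tikrinimas
-- ===== SOURCE A (Python) =====
-- def dubliu_tikrinimas(No):
-- 	"""
--
-- 	:param No: temos arba reply id kaip str
-- 	:return: dubliu skaicius
-- 	"""
-- 	No = No[::-1]
-- 	count = 0
-- 	temp_num = ""
-- 	for index, number in enumerate(No):
-- 		if index == 0:
-- 			count = 1
-- 			temp_num = number
-- 		else:
-- 			if temp_num == number:
-- 				count += 1
-- 				temp_num = number
-- 			if temp_num != number:
-- 				return count
--
-- 	return count
-- ===== SOURCE B (Python) =====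
-- def dubliu_tikrinimas(No):
--     run = 0
--     last = None
--     for ch in No:
--         if run and ch == last:
--             run += 1
--         else:
--             run = 1
--         last = ch
--     return run
-- ===== Notes on version B (the rewrite author's own statement) =====
-- stated objective: alternative
-- what changed: Instead of reversing and scanning from the end with an early return, B makes one forward pass over the original sequence maintaining the current run length (run,last); when the loop ends that run is the trailing run.
import Mathlib
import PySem

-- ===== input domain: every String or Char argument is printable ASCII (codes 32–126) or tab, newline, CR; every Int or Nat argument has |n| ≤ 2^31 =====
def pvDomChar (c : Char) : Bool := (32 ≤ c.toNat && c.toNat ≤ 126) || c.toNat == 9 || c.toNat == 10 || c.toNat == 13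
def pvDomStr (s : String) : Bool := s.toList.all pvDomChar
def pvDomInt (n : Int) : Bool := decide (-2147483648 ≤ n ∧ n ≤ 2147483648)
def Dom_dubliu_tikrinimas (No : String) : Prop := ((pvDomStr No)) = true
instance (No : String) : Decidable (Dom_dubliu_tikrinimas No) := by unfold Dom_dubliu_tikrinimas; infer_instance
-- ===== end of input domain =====

-- B replaces A's reverse-then-scan-with-early-return by a single forward pass over the
-- original string that maintains the current run length; alternative decomposition, same cost.


-- ===== PORT A =====
-- the for-loop after index 0: state is (count, temp_num); the two ifs in order:
-- if temp == number: count += 1, temp = number (then the second if is false and the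
-- loop continues); if temp != number: return count (early return).
def pvLoopA : List Char → Int → Char → Int
  | [], count, _ => count
  | number :: rest, count, temp =>
      if temp == number then pvLoopA rest (count + 1) number
      else count

def dubliu_tikrinimas (No : String) : Int :=
  -- No = No[::-1]
  let rev := No.toList.reverse
  -- count = 0; first iteration (index == 0) sets count = 1, temp_num = number
  match rev with
  | [] => 0
  | number :: rest => pvLoopA rest 1 number

-- ===== PORT B =====
-- forward pass; loop state is (run, last); 'if run and ch == last' → run ≠ 0 ∧ last = some ch
def pvStepB (st : Int × Option Char) (ch : Char) : Int × Option Char :=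
  (if st.1 ≠ 0 ∧ st.2 = some ch then st.1 + 1 else 1, some ch)

def dubliu_tikrinimas_alt (No : String) : Int :=
  (No.toList.foldl pvStepB (0, none)).1

-- ===== PRECONDITION & SPEC =====
def Spec_dubliu_tikrinimas (No : String) (out : Int) : Prop := out = dubliu_tikrinimas_alt No
instance (No : String) (out : Int) : Decidable (Spec_dubliu_tikrinimas No out) := by unfold Spec_dubliu_tikrinimas; infer_instance

-- ===== CLAIM (what is proved, stated in full; the proofs are below) =====
def Claim_equal_dubliu_tikrinimas : Prop := ∀ (No : String), Dom_dubliu_tikrinimas No → Spec_dubliu_tikrinimas No (dubliu_tikrinimas No)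

-- ===== LEMMAS AND PROOFS =====
-- trailing-run length of a list (A's value, by pvLoopA_eq below)
def pvTrail (l : List Char) : Int :=
  match l.reverse with
  | [] => 0
  | c :: rest => 1 + ((rest.takeWhile (fun x => x == c)).length : Int)

theorem pvLoopA_eq (rest : List Char) : ∀ (count : Int) (temp : Char),
    pvLoopA rest count temp = count + ((rest.takeWhile (fun x => x == temp)).length : Int) := by
  induction rest with
  | nil => intro count temp; simp [pvLoopA]
  | cons n rs ih =>
    intro count temp
    by_cases h : temp = n
    · subst h
      simp [pvLoopA, List.takeWhile, ih]
      ring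
    · have h' : (n == temp) = false := by simp; exact fun e => h e.symm
      have h'' : (temp == n) = false := by simp; exact h
      simp [pvLoopA, List.takeWhile, h', h'']

theorem pvA_eq_trail (No : String) : dubliu_tikrinimas No = pvTrail No.toList := by
  unfold dubliu_tikrinimas pvTrail
  cases h : No.toList.reverse with
  | nil => simp
  | cons c rest => simp [pvLoopA_eq]

theorem pvTrail_pos (l : List Char) (h : l ≠ []) : pvTrail l ≠ 0 := by
  unfold pvTrail
  cases hr : l.reverse with
  | nil => exact absurd (by simpa using congrArg List.reverse hr) h
  | cons c rest => simp; positivity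

-- invariant of B's forward loop: after processing l from (0, none) the state is
-- (trailing run of l, last element of l)
theorem pvFoldB_eq (l : List Char) :
    l.foldl pvStepB (0, none) = (pvTrail l, l.getLast?) := by
  induction l using List.reverseRecOn with
  | nil => simp [pvTrail]
  | append_singleton xs c ih =>
    rw [List.foldl_append, ih]
    cases hx : xs with
    | nil => simp [pvStepB, pvTrail]
    | cons y ys =>
      have hxs : xs ≠ [] := by simp [hx]
      have hrev : (xs ++ [c]).reverse = c :: xs.reverse := by simp
      by_cases hlast : xs.getLast? = some c
      · have hpos := pvTrail_pos xs hxs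
        have : pvStepB (pvTrail xs, xs.getLast?) c = (pvTrail xs + 1, some c) := by
          simp [pvStepB, hlast, hpos]
        rw [hx] at this
        simp only [List.foldl]
        rw [this]
        simp only [Prod.mk.injEq]
        -- pvTrail (xs ++ [c]) = pvTrail xs + 1 since getLast xs = c
        have hgl : (y :: ys).reverse ≠ [] := by simp
        obtain ⟨rest, hr⟩ : ∃ rest, (y :: ys).reverse = c :: rest := by
          cases hrv : (y :: ys).reverse with
          | nil => exact absurd hrv hgl
          | cons d rs =>
            have : (y :: ys).getLast? = some d := by
              rw [← List.head?_reverse]; simp [hrv]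
            rw [hx] at hlast
            rw [this] at hlast
            exact ⟨rs, by injection hlast with h; simp [h]⟩
        constructor
        · have e1 : ((y :: ys) ++ [c]).reverse = c :: c :: rest := by
            rw [List.reverse_append]; simp [hr]
          have e2 : pvTrail ((y :: ys) ++ [c]) =
              1 + (((c :: rest).takeWhile (fun x => x == c)).length : Int) := by
            unfold pvTrail; rw [e1]
          have e3 : pvTrail (y :: ys) =
              1 + ((rest.takeWhile (fun x => x == c)).length : Int) := by
            unfold pvTrail; rw [hr]
          rw [e2, e3]
          simp [List.takeWhile]
          ring
        · show some c = ((y :: ys) ++ [c]).getLast?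
          rw [List.getLast?_concat]
      · have : pvStepB (pvTrail xs, xs.getLast?) c = (1, some c) := by
          simp [pvStepB, hlast]
        rw [hx] at this
        simp only [List.foldl]
        rw [this]
        simp only [Prod.mk.injEq]
        constructor
        · unfold pvTrail
          rw [show ((y :: ys) ++ [c]).reverse = c :: (y :: ys).reverse by simp]
          cases hrv : (y :: ys).reverse with
          | nil => simp at hrv
          | cons d rs =>
            have hd : (y :: ys).getLast? = some d := by
              rw [← List.head?_reverse]; simp [hrv]
            have hdc : (d == c) = false := by
              rw [hx] at hlast
              simp
              intro e; exact hlast (e ▸ hd)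
            simp [List.takeWhile, hdc]
        · show some c = ((y :: ys) ++ [c]).getLast?
          rw [List.getLast?_concat]

-- ===== VERDICT (by name: the statement is the Claim_ definition above) =====
theorem dubliu_tikrinimas_spec : Claim_equal_dubliu_tikrinimas := by
  intro No _
  unfold Spec_dubliu_tikrinimas dubliu_tikrinimas_alt
  rw [pvFoldB_eq, pvA_eq_trail]
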